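-- pv_equiv track=rewrite | github.com/VatsalKotha/djs-synapse-ml-tasks | Task 1/Task 1.3.py | explode_chains
-- ===== SOURCE A (Python) =====
-- def explode_chains(encoded_lists):
--     def has_consecutive_three(sequence):
--         for i in range(len(sequence) - 2):
--             if sequence[i] + 1 == sequence[i + 1] and sequence[i + 1] + 1 == sequence[i + 2]:
--                 return True
--         return False
--
--     def explode_sequence(sequence):
--         i = 0
--         while i < len(sequence) - 2:
--             if sequence[i] + 1 == sequence[i + 1] and sequence[i + 1] + 1 == sequence[i + 2]:
--                 sequence.pop(i)
--                 sequence.pop(i)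
--                 sequence.pop(i)
--             else:
--                 i += 1
--
--     for encoded_list in encoded_lists:
--         while has_consecutive_three(encoded_list):
--             explode_sequence(encoded_list)
--
--     return encoded_lists
-- ===== SOURCE B (Python) =====
-- # B: per list, repeat a single streaming pass (3-element window, drop completed
-- # ascending triples, never look back within a pass) until a pass changes nothing.
-- # Note: A mutates the inner lists in place and returns the same outer list; B leaves
-- # its argument untouched and builds new lists (the equivalence is about the return value).
-- def explode_chains(encoded_lists):
--     def pass_once(seq):
--         out = []
--         buf = []
--         for x in seq:
--             buf.append(x)
--             if len(buf) == 3: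
--                 if buf[0] + 1 == buf[1] and buf[1] + 1 == buf[2]:
--                     buf = []
--                 else:
--                     out.append(buf.pop(0))
--         return out + buf
--
--     result = []
--     for seq in encoded_lists:
--         cur = list(seq)
--         nxt = pass_once(cur)
--         while nxt != cur:
--             cur = nxt
--             nxt = pass_once(cur)
--         result.append(cur)
--     return result
-- ===== Notes on version B (the rewrite author's own statement) =====
-- stated objective: alternative
-- what changed: Each round over a list is a single linear streaming pass with a 2-element pending buffer that drops completed ascending triples, repeated until a pass changes nothing, instead of A's index loop with three pop(i) calls per removal plus a separate has_consecutive_three re-scan per round; B builds new lists instead of mutating the input in place.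
import Mathlib
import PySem

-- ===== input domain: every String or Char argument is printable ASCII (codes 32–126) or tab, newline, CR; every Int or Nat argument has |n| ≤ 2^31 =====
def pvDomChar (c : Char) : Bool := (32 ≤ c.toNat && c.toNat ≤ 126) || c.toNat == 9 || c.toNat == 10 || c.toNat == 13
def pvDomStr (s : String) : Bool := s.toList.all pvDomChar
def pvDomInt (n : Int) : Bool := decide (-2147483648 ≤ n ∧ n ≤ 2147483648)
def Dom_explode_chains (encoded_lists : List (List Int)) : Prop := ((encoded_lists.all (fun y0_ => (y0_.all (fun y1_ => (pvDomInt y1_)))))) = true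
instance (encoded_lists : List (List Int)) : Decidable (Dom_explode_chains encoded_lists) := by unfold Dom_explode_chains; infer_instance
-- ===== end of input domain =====

-- B reworks the round: one streaming pass with a 2-element pending buffer that drops
-- completed ascending triples, repeated until a pass changes nothing, instead of A's
-- index loop with pop(i) calls plus a separate has_consecutive_three re-scan per round.
-- A mutates the inner lists in place and returns the outer list itself; B leaves
-- its argument untouched — the equivalence proved is about the return value only.
-- (The while loops are ported with a structurally decreasing fuel argument; fuel
-- s.length(+1) is enough because every loop step either advances i or drops 3 elements.)

-- ===== PORT A =====
-- for i in range(len(sequence) - 2): triple check (indices in range, so getD is exact)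
def hasTripleLoop : Nat → List Int → Nat → Bool
  | 0, _, _ => false
  | fuel+1, s, i =>
    if i + 2 < s.length then
      if s.getD i 0 + 1 == s.getD (i+1) 0 && s.getD (i+1) 0 + 1 == s.getD (i+2) 0 then true
      else hasTripleLoop fuel s (i+1)
    else false

-- while i < len(sequence) - 2: … — sequence.pop(i) three times is eraseIdx at i three times
def explodeSeqLoop : Nat → List Int → Nat → List Int
  | 0, s, _ => s
  | fuel+1, s, i =>
    if i + 2 < s.length then
      if s.getD i 0 + 1 == s.getD (i+1) 0 && s.getD (i+1) 0 + 1 == s.getD (i+2) 0 then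
        explodeSeqLoop fuel (((s.eraseIdx i).eraseIdx i).eraseIdx i) i
      else explodeSeqLoop fuel s (i+1)
    else s

-- while has_consecutive_three(encoded_list): explode_sequence(encoded_list)
def explodeLoop : Nat → List Int → List Int
  | 0, s => s
  | fuel+1, s =>
    if hasTripleLoop s.length s 0 then explodeLoop fuel (explodeSeqLoop (s.length + 1) s 0)
    else s

def explode_chains (encoded_lists : List (List Int)) : List (List Int) :=
  encoded_lists.map (fun s => explodeLoop (s.length + 1) s)

-- ===== PORT B =====
-- one step of pass_once's for loop: buf holds at most two pending elements
def passStep (st : List Int × List Int) (x : Int) : List Int × List Int :=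
  let out := st.1
  let buf := st.2 ++ [x]
  if buf.length == 3 then
    if buf.getD 0 0 + 1 == buf.getD 1 0 && buf.getD 1 0 + 1 == buf.getD 2 0 then (out, [])
    else (out ++ [buf.getD 0 0], buf.drop 1)
  else (out, buf)

-- pass_once(seq): fold the loop over seq, then return out + buf
def passOnceB (s : List Int) : List Int :=
  (s.foldl passStep ([], [])).1 ++ (s.foldl passStep ([], [])).2

-- nxt = pass_once(cur); while nxt != cur: cur = nxt; nxt = pass_once(cur); return cur
def explodeLoopB : Nat → List Int → List Int
  | 0, s => s
  | fuel+1, s => if passOnceB s = s then s else explodeLoopB fuel (passOnceB s)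

def explode_chains_alt (encoded_lists : List (List Int)) : List (List Int) :=
  encoded_lists.map (fun s => explodeLoopB (s.length + 1) s)

-- ===== PRECONDITION & SPEC =====
def Spec_explode_chains (encoded_lists : List (List Int)) (out : List (List Int)) : Prop := out = explode_chains_alt encoded_lists
instance (encoded_lists : List (List Int)) (out : List (List Int)) : Decidable (Spec_explode_chains encoded_lists out) := by unfold Spec_explode_chains; infer_instance

-- ===== CLAIM (what is proved, stated in full; the proofs are below) =====
def Claim_equal_explode_chains : Prop := ∀ (encoded_lists : List (List Int)), Dom_explode_chains encoded_lists → Spec_explode_chains encoded_lists (explode_chains encoded_lists)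

-- ===== LEMMAS AND PROOFS =====
-- one pass of removals, written structurally; both loops are proved equal to it
def passOnce : List Int → List Int
  | a :: b :: c :: r =>
      if a + 1 == b && b + 1 == c then passOnce r else a :: passOnce (b :: c :: r)
  | s => s

-- consecutive-triple existence, written structurally
def hasT : List Int → Bool
  | a :: b :: c :: r => (a + 1 == b && b + 1 == c) || hasT (b :: c :: r)
  | _ => false

theorem passOnce_short (s : List Int) (h : s.length ≤ 2) : passOnce s = s := by
  match s, h with
  | [], _ => rfl
  | [a], _ => rfl
  | [a, b], _ => rfl

theorem hasT_short (s : List Int) (h : s.length ≤ 2) : hasT s = false := by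
  match s, h with
  | [], _ => rfl
  | [a], _ => rfl
  | [a, b], _ => rfl

theorem drop_cons3 : ∀ (i : Nat) (s : List Int), i + 2 < s.length →
    s.drop i = s.getD i 0 :: s.getD (i+1) 0 :: s.getD (i+2) 0 :: s.drop (i+3)
  | 0, a :: b :: c :: r, _ => by simp [List.getD]
  | i+1, a :: t, h => by
      simp only [List.drop_succ_cons, List.getD_cons_succ]
      exact drop_cons3 i t (by simpa using h)
  | 0, [], h => by simp at h
  | 0, [a], h => by simp at h
  | 0, [a, b], h => by simp at h
  | i+1, [], h => by simp at h

theorem erase3_eq : ∀ (i : Nat) (s : List Int), i + 2 < s.length →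
    ((s.eraseIdx i).eraseIdx i).eraseIdx i = s.take i ++ s.drop (i+3)
  | 0, a :: b :: c :: r, _ => by simp
  | i+1, a :: t, h => by
      simp only [List.eraseIdx_cons_succ, List.take_succ_cons, List.drop_succ_cons,
        List.cons_append, List.cons.injEq]
      exact ⟨by trivial, erase3_eq i t (by simpa using h)⟩
  | 0, [], h => by simp at h
  | 0, [a], h => by simp at h
  | 0, [a, b], h => by simp at h
  | i+1, [], h => by simp at h

theorem drop_succ_cons2 (s : List Int) (i : Nat) (h : i + 2 < s.length) :
    s.drop (i+1) = s.getD (i+1) 0 :: s.getD (i+2) 0 :: s.drop (i+3) := by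
  have := congrArg List.tail (drop_cons3 i s h)
  simpa [List.tail_drop] using this

theorem hasTripleLoop_eq : ∀ (fuel : Nat) (s : List Int) (i : Nat), s.length ≤ fuel + i →
    hasTripleLoop fuel s i = hasT (s.drop i) := by
  intro fuel
  induction fuel with
  | zero =>
      intro s i hf
      rw [hasTripleLoop, hasT_short _ (by simp; omega)]
  | succ fuel ih =>
      intro s i hf
      rw [hasTripleLoop]
      by_cases hg : i + 2 < s.length
      · rw [if_pos hg]
        by_cases ht : (s.getD i 0 + 1 == s.getD (i+1) 0
            && s.getD (i+1) 0 + 1 == s.getD (i+2) 0) = true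
        · rw [if_pos ht, drop_cons3 i s hg, hasT, ht, Bool.true_or]
        · have h' : (s.getD i 0 + 1 == s.getD (i+1) 0
              && s.getD (i+1) 0 + 1 == s.getD (i+2) 0) = false := by simpa using ht
          rw [if_neg ht, ih s (i+1) (by omega), drop_cons3 i s hg, hasT, h', Bool.false_or,
            drop_succ_cons2 s i hg]
      · rw [if_neg hg, hasT_short _ (by simp; omega)]

theorem explodeSeqLoop_eq : ∀ (fuel : Nat) (s : List Int) (i : Nat), s.length ≤ fuel + i →
    explodeSeqLoop fuel s i = s.take i ++ passOnce (s.drop i) := by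
  intro fuel
  induction fuel with
  | zero =>
      intro s i hf
      rw [explodeSeqLoop, passOnce_short _ (by simp; omega),
        List.drop_eq_nil_of_le (by omega), List.take_of_length_le (by omega), List.append_nil]
  | succ fuel ih =>
      intro s i hf
      rw [explodeSeqLoop]
      by_cases hg : i + 2 < s.length
      · rw [if_pos hg]
        by_cases ht : (s.getD i 0 + 1 == s.getD (i+1) 0
            && s.getD (i+1) 0 + 1 == s.getD (i+2) 0) = true
        · rw [if_pos ht]
          have hlen : (s.take i).length = i := by simp; omega
          have hel : (((s.eraseIdx i).eraseIdx i).eraseIdx i).length = s.length - 3 := by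
            rw [erase3_eq i s hg]
            simp
            omega
          rw [ih (((s.eraseIdx i).eraseIdx i).eraseIdx i) i (by omega)]
          have e1 : (((s.eraseIdx i).eraseIdx i).eraseIdx i).take i = s.take i := by
            rw [erase3_eq i s hg, List.take_append_of_le_length (le_of_eq hlen.symm)]
            simp [List.take_take]
          have e2 : (((s.eraseIdx i).eraseIdx i).eraseIdx i).drop i = s.drop (i+3) := by
            rw [erase3_eq i s hg, List.drop_append_of_le_length (le_of_eq hlen.symm)]
            simp
          rw [e1, e2, drop_cons3 i s hg]
          simp only [passOnce]
          rw [if_pos ht]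
        · rw [if_neg ht]
          have h0 : i < s.length := by omega
          rw [ih s (i+1) (by omega), drop_cons3 i s hg]
          simp only [passOnce]
          rw [if_neg ht]
          have hget : s.getD i 0 = s[i] := by
            simp [List.getD_eq_getElem?_getD, List.getElem?_eq_getElem h0]
          rw [List.take_succ_eq_append_getElem h0, ← hget, drop_succ_cons2 s i hg]
          simp
      · rw [if_neg hg, passOnce_short _ (by simp; omega)]
        simp

theorem foldl_passStep_eq (stream : List Int) : ∀ (out buf : List Int), buf.length ≤ 2 →
    (stream.foldl passStep (out, buf)).1 ++ (stream.foldl passStep (out, buf)).2 =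
      out ++ passOnce (buf ++ stream) := by
  induction stream with
  | nil =>
      intro out buf hb
      simp [passOnce_short buf hb]
  | cons x rest ih =>
      intro out buf hb
      match buf, hb with
      | [], _ =>
          have h1 : passStep (out, []) x = (out, [x]) := by simp [passStep]
          simp only [List.foldl_cons, h1]
          simpa using ih out [x] (by simp)
      | [a], _ =>
          have h1 : passStep (out, [a]) x = (out, [a, x]) := by simp [passStep]
          simp only [List.foldl_cons, h1]
          simpa using ih out [a, x] (by simp)
      | [a, b], _ =>
          by_cases hc : (a + 1 == b && b + 1 == x) = true
          · have h1 : passStep (out, [a, b]) x = (out, []) := by simp [passStep, hc]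
            simp only [List.foldl_cons, h1]
            rw [ih out [] (by simp)]
            simp only [List.nil_append, List.cons_append]
            conv_rhs => rw [passOnce]
            rw [if_pos hc]
          · have h1 : passStep (out, [a, b]) x = (out ++ [a], [b, x]) := by
              simp [passStep, hc]
            simp only [List.foldl_cons, h1]
            rw [ih (out ++ [a]) [b, x] (by simp)]
            simp only [List.cons_append, List.nil_append, List.append_assoc]
            conv_rhs => rw [passOnce]
            rw [if_neg hc]

theorem passOnceB_eq (s : List Int) : passOnceB s = passOnce s := by
  have := foldl_passStep_eq s [] [] (by simp)
  simpa [passOnceB] using this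

theorem passOnce_sublist (s : List Int) : (passOnce s).Sublist s := by
  fun_induction passOnce s with
  | case1 a b c r h ih =>
      exact ih.trans ((List.sublist_cons_self _ _).trans
        ((List.sublist_cons_self _ _).trans (List.sublist_cons_self _ _)))
  | case2 a b c r h ih =>
      exact ih.cons₂ _
  | case3 s hs =>
      exact List.Sublist.refl _

theorem passOnce_length_le (s : List Int) : (passOnce s).length ≤ s.length :=
  (passOnce_sublist s).length_le

theorem hasT_iff (s : List Int) : hasT s = true ↔ ¬ passOnce s = s := by
  fun_induction passOnce s with
  | case1 a b c r h ih =>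
      constructor
      · intro _ hc
        have h1 := passOnce_length_le r
        have h2 := congrArg List.length hc
        simp at h2
        omega
      · intro _
        rw [hasT]
        simp [h]
  | case2 a b c r h ih =>
      have h' : (a + 1 == b && b + 1 == c) = false := by simpa using h
      rw [hasT, h', Bool.false_or, ih]
      simp
  | case3 s hs =>
      have hlen : s.length ≤ 2 := by
        match s, hs with
        | [], _ => simp
        | [a], _ => simp
        | [a, b], _ => simp
        | a :: b :: c :: r, hs => exact absurd rfl (hs a b c r)
      rw [hasT_short s hlen]
      simp

theorem explodeLoop_eq : ∀ (fuel : Nat) (s : List Int),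
    explodeLoop fuel s = explodeLoopB fuel s := by
  intro fuel
  induction fuel with
  | zero => intro s; rfl
  | succ fuel ih =>
      intro s
      rw [explodeLoop, explodeLoopB]
      have hh : hasTripleLoop s.length s 0 = hasT s := by
        have := hasTripleLoop_eq s.length s 0 (by omega)
        simpa using this
      have hs : explodeSeqLoop (s.length + 1) s 0 = passOnce s := by
        have := explodeSeqLoop_eq (s.length + 1) s 0 (by omega)
        simpa using this
      rw [hh, hs, passOnceB_eq]
      by_cases h : hasT s = true
      · rw [if_pos h, if_neg ((hasT_iff s).mp h)]
        exact ih (passOnce s)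
      · rw [if_neg (by simpa using h), if_pos (by
          by_contra hc
          exact h ((hasT_iff s).mpr hc))]

-- ===== VERDICT (by name: the statement is the Claim_ definition above) =====
theorem explode_chains_spec : Claim_equal_explode_chains := by
  intro ls _
  unfold Spec_explode_chains explode_chains explode_chains_alt
  exact List.map_congr_left (fun s _ => explodeLoop_eq (s.length + 1) s)
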